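-- pv_equiv track=rewrite | github.com/igotyabingo/codingtest | Python3/프로그래머스/1/133502. 햄버거 만들기/햄버거 만들기.py | solution
-- ===== SOURCE A (Python) =====
-- def solution(ingredient):
--     # 스택의 구조를 사용해야 한다.
--     answer = 0
--     stack = []
--
--     for i in range(len(ingredient)):
--         stack.append(ingredient[i])
--         if(stack[-4:]==[1, 2, 3, 1]):
--             stack.pop()
--             stack.pop()
--             stack.pop()
--             stack.pop()
--             answer += 1
--     return answer
-- ===== SOURCE B (Python) =====
-- def solution(ingredient):
--     # Repeated reduction: scan the working list for the leftmost contiguous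
--     # [1, 2, 3, 1], remove it, count, and rescan until none remains.
--     work = list(ingredient)
--     answer = 0
--     while True:
--         idx = None
--         for i in range(len(work)):
--             if work[i:i+4] == [1, 2, 3, 1]:
--                 idx = i
--                 break
--         if idx is None:
--             return answer
--         work = work[:idx] + work[idx+4:]
--         answer += 1
-- ===== Notes on version B (the rewrite author's own statement) =====
-- stated objective: alternative
-- what changed: Replaced the single left-to-right stack pass (push each element, pop four when the stack top is [1,2,3,1]) by repeated reduction scans: find the leftmost contiguous [1,2,3,1] in a working copy, delete it, increment the count, and rescan until no occurrence remains; equivalence rests on the stack pass removing exactly the leftmost occurrence each time.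
import Mathlib
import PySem

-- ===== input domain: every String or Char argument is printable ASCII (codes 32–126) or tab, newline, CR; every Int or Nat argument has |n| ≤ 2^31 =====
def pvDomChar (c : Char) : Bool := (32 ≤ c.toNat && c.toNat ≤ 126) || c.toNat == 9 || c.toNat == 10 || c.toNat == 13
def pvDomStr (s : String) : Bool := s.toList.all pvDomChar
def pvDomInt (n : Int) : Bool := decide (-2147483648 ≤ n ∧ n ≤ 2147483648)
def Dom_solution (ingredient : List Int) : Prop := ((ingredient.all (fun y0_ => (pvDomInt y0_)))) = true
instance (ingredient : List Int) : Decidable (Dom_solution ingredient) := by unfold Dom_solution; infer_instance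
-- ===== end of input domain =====

-- B replaces A's single stack pass by repeated leftmost-occurrence removal scans on a
-- working copy (alternative decomposition, not faster); return value only, neither port mutates its argument.

-- ===== PORT A =====
-- A's loop body: append ingredient[i], test stack[-4:] == [1,2,3,1] (PySem.List.slice with
-- start -4), and on a match pop() four times — each pop removes the last element (= dropLast;
-- the stack has ≥ 4 elements in that branch, so pop never raises) and answer += 1.
def stepA (st : Int × List Int) (x : Int) : Int × List Int :=
  if PySem.List.slice (st.2 ++ [x]) (some (-4)) none = ([1, 2, 3, 1] : List Int) then
    (st.1 + 1, (st.2 ++ [x]).dropLast.dropLast.dropLast.dropLast)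
  else
    (st.1, st.2 ++ [x])

def solution (ingredient : List Int) : Int :=
  ((PySem.List.pyRange 0 (ingredient.length : Int) 1).foldl
    (fun st i => stepA st (PySem.List.pyGetD ingredient i 0))
    ((0 : Int), ([] : List Int))).1

-- ===== PORT B =====
-- Source B's inner loop 'for i in range(len(work)): if work[i:i+4] == [1,2,3,1]: idx = i; break'
-- ported as structural recursion over the suffix: work[i:i+4] = (work.drop i).take 4.
def findPat : List Int → Option Nat
  | [] => none
  | x :: rest =>
    if (x :: rest).take 4 = ([1, 2, 3, 1] : List Int) then some 0
    else (findPat rest).map (· + 1)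

-- needed by reduceLoop's termination: a found index leaves room for the 4-element pattern
theorem findPat_bound : ∀ (w : List Int) (i : Nat), findPat w = some i → i + 4 ≤ w.length := by
  intro w
  induction w with
  | nil => intro i h; simp [findPat] at h
  | cons x rest ih =>
    intro i h
    simp only [findPat] at h
    split at h
    · rename_i htake
      cases h
      have h4 : (List.take 4 (x :: rest)).length = 4 := by rw [htake]; rfl
      simp [List.length_take] at h4
      simp only [List.length_cons]
      omega
    · rcases Option.map_eq_some_iff.mp h with ⟨j, hj, rfl⟩
      have := ih j hj
      simp only [List.length_cons]
      omega

-- Source B's outer while loop: delete the found occurrence (work[:idx] + work[idx+4:]) and rescan.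
def reduceLoop (work : List Int) (answer : Int) : Int :=
  match h : findPat work with
  | none => answer
  | some i => reduceLoop (work.take i ++ work.drop (i + 4)) (answer + 1)
termination_by work.length
decreasing_by
  have hb := findPat_bound work i h
  simp [List.length_take, List.length_drop]
  omega

def solution_alt (ingredient : List Int) : Int :=
  reduceLoop ingredient 0

-- ===== PRECONDITION & SPEC =====
def Spec_solution (ingredient : List Int) (out : Int) : Prop := out = solution_alt ingredient
instance (ingredient : List Int) (out : Int) : Decidable (Spec_solution ingredient out) := by unfold Spec_solution; infer_instance

-- ===== CLAIM (what is proved, stated in full; the proofs are below) =====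
def Claim_equal_solution : Prop := ∀ (ingredient : List Int), Dom_solution ingredient → Spec_solution ingredient (solution ingredient)

-- ===== LEMMAS AND PROOFS =====

theorem findPat_none_of_not_infix (l : List Int)
    (h : ¬ ([1, 2, 3, 1] : List Int) <:+: l) : findPat l = none := by
  induction l with
  | nil => simp [findPat]
  | cons x rest ih =>
    simp only [findPat]
    split
    · rename_i htake
      exact absurd ((htake ▸ List.take_prefix 4 (x :: rest)).isInfix) h
    · have : ¬ ([1, 2, 3, 1] : List Int) <:+: rest := fun hi =>
        h (hi.trans (List.suffix_cons x rest).isInfix)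
      simp [ih this]

theorem reduceLoop_of_none (w : List Int) (a : Int) (h : findPat w = none) :
    reduceLoop w a = a := by
  conv_lhs => rw [reduceLoop]
  split <;> simp_all

theorem reduceLoop_of_some (w : List Int) (a : Int) (i : Nat) (h : findPat w = some i) :
    reduceLoop w a = reduceLoop (w.take i ++ w.drop (i + 4)) (a + 1) := by
  conv_lhs => rw [reduceLoop]
  split
  · simp_all
  · rename_i j hj
    rw [hj] at h
    cases h
    rfl

-- The leftmost occurrence of [1,2,3,1] in t ++ [1,2,3,1] ++ r starts at index t.length,
-- provided the "stack" t ++ [1,2,3] contains no occurrence.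
theorem findPat_append_pat (t r : List Int)
    (h : ¬ ([1, 2, 3, 1] : List Int) <:+: (t ++ [1, 2, 3])) :
    findPat (t ++ [1, 2, 3, 1] ++ r) = some t.length := by
  induction t with
  | nil => simp [findPat]
  | cons x t' ih =>
    simp only [List.cons_append, findPat]
    split
    · rename_i htake
      exfalso
      rw [show x :: (t' ++ [1, 2, 3, 1] ++ r) = ((x :: t') ++ [1, 2, 3]) ++ (1 :: r) by simp,
        List.take_append_of_le_length (by simp)] at htake
      exact h ((htake ▸ List.take_prefix 4 ((x :: t') ++ [1, 2, 3])).isInfix)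
    · have h' : ¬ ([1, 2, 3, 1] : List Int) <:+: (t' ++ [1, 2, 3]) := fun hi =>
        h (hi.trans (List.suffix_cons x (t' ++ [1, 2, 3])).isInfix)
      rw [ih h']
      simp

-- A's fold over the remaining input, from any stack containing no occurrence,
-- yields exactly B's leftmost-removal count on stack ++ rest.
theorem main_lemma (rest : List Int) : ∀ (stack : List Int) (ans : Int),
    ¬ ([1, 2, 3, 1] : List Int) <:+: stack →
    (rest.foldl stepA (ans, stack)).1 = reduceLoop (stack ++ rest) ans := by
  induction rest with
  | nil =>
    intro stack ans hno
    simp [reduceLoop_of_none _ _ (findPat_none_of_not_infix stack hno)]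
  | cons x rest ih =>
    intro stack ans hno
    simp only [List.foldl_cons, stepA]
    rw [PySem.List.slice_from_neg_ofNat (stack ++ [x]) 4 (by omega)]
    by_cases hc : (stack ++ [x]).drop ((stack ++ [x]).length - 4) = ([1, 2, 3, 1] : List Int)
    · -- the top four elements match: A pops them, B removes the leftmost occurrence
      have hlen4 : 4 ≤ (stack ++ [x]).length := by
        have h4 : ((stack ++ [x]).drop ((stack ++ [x]).length - 4)).length = 4 := by
          rw [hc]; rfl
        rw [List.length_drop] at h4
        omega
      set n := (stack ++ [x]).length with hn
      have hsplit : stack ++ [x] = ((stack ++ [x]).take (n - 4)) ++ [1, 2, 3, 1] := by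
        conv_lhs => rw [← List.take_append_drop (n - 4) (stack ++ [x])]
        rw [hc]
      set t := (stack ++ [x]).take (n - 4) with ht
      -- split off the last element: stack = t ++ [1,2,3] and x = 1
      have hstack : stack = t ++ [1, 2, 3] ∧ x = 1 := by
        have h2 : stack ++ [x] = (t ++ [1, 2, 3]) ++ [(1 : Int)] := by
          rw [hsplit]; simp
        have := List.append_inj' h2 rfl
        simpa using this
      obtain ⟨hstack1, hx1⟩ := hstack
      -- t carries no occurrence (it is a prefix of stack)
      have hnot : ¬ ([1, 2, 3, 1] : List Int) <:+: t := fun hi =>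
        hno (hi.trans ((List.prefix_append t [1, 2, 3]).isInfix.trans (by rw [hstack1])))
      -- A's four pops leave exactly t
      have hdrop : (stack ++ [x]).dropLast.dropLast.dropLast.dropLast = t := by
        rw [hsplit]
        rw [show t ++ [(1 : Int), 2, 3, 1] = (((t ++ [1]) ++ [2]) ++ [3]) ++ [1] by simp]
        simp
      -- B finds the occurrence at index t.length and removes it
      have hfind : findPat (stack ++ x :: rest) = some t.length := by
        rw [show stack ++ x :: rest = t ++ [1, 2, 3, 1] ++ rest by rw [hstack1, hx1]; simp]
        exact findPat_append_pat t rest (by rw [← hstack1]; exact hno)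
      have hred : reduceLoop (stack ++ x :: rest) ans = reduceLoop (t ++ rest) (ans + 1) := by
        rw [reduceLoop_of_some _ _ _ hfind]
        congr 1
        have e1 : ((t ++ [1, 2, 3, 1]) ++ rest).take t.length = t := by
          rw [List.append_assoc, List.take_left]
        have e2 : ((t ++ [1, 2, 3, 1]) ++ rest).drop (t.length + 4) = rest := by
          rw [show t.length + 4 = (t ++ [1, 2, 3, 1]).length by simp, List.drop_left]
        rw [show stack ++ x :: rest = (t ++ [1, 2, 3, 1]) ++ rest by rw [hstack1, hx1]; simp,
          e1, e2]
      rw [if_pos hc, hdrop, hred]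
      exact ih t (ans + 1) hnot
    · -- no match: the new stack still contains no occurrence
      have hno' : ¬ ([1, 2, 3, 1] : List Int) <:+: (stack ++ [x]) := by
        rintro ⟨s, u, hsu⟩
        rcases List.eq_nil_or_concat u with rfl | ⟨u', y, rfl⟩
        · -- occurrence is a suffix: the last four elements match, contradiction
          apply hc
          have h1 : stack ++ [x] = s ++ [1, 2, 3, 1] := by rw [← hsu]; simp
          have h2 : (stack ++ [x]).length - 4 = s.length := by
            have hl : (stack ++ [x]).length = s.length + 4 := by rw [h1]; simp
            omega
          rw [h2, h1, List.drop_left]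
        · -- occurrence lies inside stack
          apply hno
          refine ⟨s, u', ?_⟩
          have heq : (stack ++ [x]) = (s ++ [1, 2, 3, 1] ++ u') ++ [y] := by
            rw [← hsu]; simp
          have h3 := (List.append_inj' heq rfl).1
          simpa using h3.symm
      rw [if_neg hc,
        show stack ++ x :: rest = (stack ++ [x]) ++ rest by simp]
      exact ih (stack ++ [x]) ans hno'

-- ===== VERDICT (by name: the statement is the Claim_ definition above) =====
theorem solution_spec : Claim_equal_solution := by
  intro ingredient _
  unfold Spec_solution solution solution_alt
  rw [PySem.List.foldl_pyRange_zero_pyGetD']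
  have := main_lemma ingredient [] 0 (by simp)
  simpa using this
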